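-- pv_equiv track=rewrite | github.com/SonicJuice/Recreational-Algorithms | number_series/polygonals.py | polygonals
-- ===== SOURCE A (Python) =====
-- def polygonals(sides, limit):
--     polygonal_numbers = []
--     n = 1
--     generate = True
--     while generate:
--         """
--         nth-s-agonal number: 'P(s, n) = (n * ((s - 2) * n - (s - 4))) /', where 's' and 'n' are the number of sides and index
--         of the polygonal number. These represent dots arranged as regular polygons (i.e. plane figures of connected line segments,
--         with equal vertex angles and side lengths)
--         """
--         result = (n * ((sides - 2) * n - (sides - 4))) // 2
--         if result > limit + 1:
--             generate = False
--         else: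
--             polygonal_numbers.append(result)
--             n += 1
--     return polygonal_numbers
-- ===== SOURCE B (Python) =====
-- def polygonals(sides, limit):
--     target = limit + 1
--     if target < 1:
--         return []
--     # P(sides, n) is nondecreasing in n for sides >= 2 and P(n) >= n, so binary-search
--     # the largest index k in [1, target] with P(k) <= target, then emit all terms by index.
--     lo, hi = 1, target
--     while lo < hi:
--         mid = (lo + hi + 1) // 2
--         if (mid * ((sides - 2) * mid - (sides - 4))) // 2 <= target:
--             lo = mid
--         else:
--             hi = mid - 1
--     return [(n * ((sides - 2) * n - (sides - 4))) // 2 for n in range(1, lo + 1)]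
-- ===== Notes on version B (the rewrite author's own statement) =====
-- stated objective: alternative
-- what changed: B first binary-searches the largest index k with P(k) <= limit+1 (using that P is nondecreasing for sides >= 2) and then emits the k terms by a comprehension over range(1, k+1), instead of A's test-each-term-until-it-exceeds while loop; Pre_ excludes sides <= 1 with limit >= 0, where A loops forever.
import Mathlib
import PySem

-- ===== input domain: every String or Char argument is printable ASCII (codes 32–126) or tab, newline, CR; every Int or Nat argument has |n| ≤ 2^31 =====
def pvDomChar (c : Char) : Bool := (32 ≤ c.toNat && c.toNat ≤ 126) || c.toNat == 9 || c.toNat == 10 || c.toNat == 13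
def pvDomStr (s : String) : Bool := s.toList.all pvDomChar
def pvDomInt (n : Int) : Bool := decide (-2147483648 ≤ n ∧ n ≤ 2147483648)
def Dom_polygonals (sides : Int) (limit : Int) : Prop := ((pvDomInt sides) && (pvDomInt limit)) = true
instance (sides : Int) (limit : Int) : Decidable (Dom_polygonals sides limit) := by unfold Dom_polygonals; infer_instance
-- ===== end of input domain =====

-- B binary-searches the number of terms and then generates them by index, instead of
-- testing each successive term; equal wherever A terminates.

-- ===== PORT A =====
-- A's while loop, ported with a fuel guard (limit.toNat + 2 iterations suffice whenever the Python terminates).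
def polygonalsLoopA (sides limit : Int) (n : Int) (acc : List Int) (fuel : Nat) : List Int :=
  match fuel with
  | 0 => acc.reverse
  | fuel + 1 =>
    let result := PySem.Int.floordiv (n * ((sides - 2) * n - (sides - 4))) 2
    if result > limit + 1 then acc.reverse
    else polygonalsLoopA sides limit (n + 1) (result :: acc) fuel

def polygonals (sides : Int) (limit : Int) : List Int :=
  polygonalsLoopA sides limit 1 [] (limit.toNat + 2)

-- ===== PORT B =====
-- B's binary-search loop (fuel-guarded; the gap hi - lo shrinks every step, so limit.toNat + 2 suffices).
def polygonalsSearch (sides target : Int) (lo hi : Int) (fuel : Nat) : Int :=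
  match fuel with
  | 0 => lo
  | fuel + 1 =>
    if lo < hi then
      let mid := PySem.Int.floordiv (lo + hi + 1) 2
      if PySem.Int.floordiv (mid * ((sides - 2) * mid - (sides - 4))) 2 ≤ target then
        polygonalsSearch sides target mid hi fuel
      else
        polygonalsSearch sides target lo (mid - 1) fuel
    else lo

def polygonals_alt (sides : Int) (limit : Int) : List Int :=
  let target := limit + 1
  if target < 1 then []
  else
    let k := polygonalsSearch sides target 1 target (limit.toNat + 2)
    (PySem.List.pyRange 1 (k + 1) 1).map
      (fun n => PySem.Int.floordiv (n * ((sides - 2) * n - (sides - 4))) 2)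

-- ===== PRECONDITION & SPEC =====
-- Pre_ excludes sides ≤ 1 with limit ≥ 0: there A's terms never exceed 1 ≤ limit + 1, so A loops forever.
def Pre_polygonals (sides : Int) (limit : Int) : Prop := 2 ≤ sides ∨ limit < 0
instance (sides : Int) (limit : Int) : Decidable (Pre_polygonals sides limit) := by unfold Pre_polygonals; infer_instance
def pvWitness_polygonals : Int × Int := (4, 30)

def Spec_polygonals (sides : Int) (limit : Int) (out : List Int) : Prop := out = polygonals_alt sides limit
instance (sides : Int) (limit : Int) (out : List Int) : Decidable (Spec_polygonals sides limit out) := by unfold Spec_polygonals; infer_instance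

-- ===== CLAIM (what is proved, stated in full; the proofs are below) =====
def Claim_equal_polygonals : Prop := ∀ (sides : Int) (limit : Int), Dom_polygonals sides limit → Pre_polygonals sides limit → Spec_polygonals sides limit (polygonals sides limit)

-- ===== LEMMAS AND PROOFS =====

-- the nth polygonal value, as both ports compute it
def pvP (sides n : Int) : Int := PySem.Int.floordiv (n * ((sides - 2) * n - (sides - 4))) 2

theorem pvP_one (sides : Int) : pvP sides 1 = 1 := by
  unfold pvP
  rw [PySem.Int.floordiv_eq_ediv_of_pos (by norm_num)]
  norm_num

-- P is nondecreasing in the index for sides ≥ 2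
theorem pvP_mono (sides a b : Int) (hs : 2 ≤ sides) (ha : 1 ≤ a) (hab : a ≤ b) :
    pvP sides a ≤ pvP sides b := by
  unfold pvP
  rw [PySem.Int.floordiv_eq_ediv_of_pos (by norm_num),
      PySem.Int.floordiv_eq_ediv_of_pos (by norm_num)]
  apply Int.ediv_le_ediv (by norm_num)
  nlinarith [mul_nonneg (sub_nonneg.mpr hab) (sub_nonneg.mpr hs)]

-- P(n) ≥ n for sides ≥ 2
theorem pvP_ge (sides n : Int) (hs : 2 ≤ sides) (hn : 1 ≤ n) : n ≤ pvP sides n := by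
  unfold pvP
  rw [PySem.Int.floordiv_eq_ediv_of_pos (by norm_num)]
  have h : 2 * n ≤ n * ((sides - 2) * n - (sides - 4)) := by
    nlinarith [mul_nonneg (sub_nonneg.mpr hs) (mul_nonneg (by omega : (0:Int) ≤ n) (by omega : (0:Int) ≤ n - 1))]
  calc n = 2 * n / 2 := by omega
    _ ≤ n * ((sides - 2) * n - (sides - 4)) / 2 := Int.ediv_le_ediv (by norm_num) h

-- binary-search correctness: with the bracketing invariant, the result k satisfies
-- 1 ≤ k, P(k) ≤ target, P(k+1) > target
theorem pvSearch_spec (sides target : Int) :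
    ∀ (fuel : Nat) (lo hi : Int), 1 ≤ lo → lo ≤ hi →
      pvP sides lo ≤ target → target < pvP sides (hi + 1) → hi - lo ≤ (fuel : Int) →
      1 ≤ polygonalsSearch sides target lo hi fuel ∧
      pvP sides (polygonalsSearch sides target lo hi fuel) ≤ target ∧
      target < pvP sides (polygonalsSearch sides target lo hi fuel + 1) := by
  intro fuel
  induction fuel with
  | zero =>
    intro lo hi hlo hlohi hplo hphi hgap
    have : lo = hi := by exact_mod_cast le_antisymm (by exact_mod_cast (by omega : lo ≤ hi)) (by omega)
    simp only [polygonalsSearch]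
    subst this
    exact ⟨hlo, hplo, hphi⟩
  | succ fuel ih =>
    intro lo hi hlo hlohi hplo hphi hgap
    simp only [polygonalsSearch]
    by_cases hlt : lo < hi
    · simp only [if_pos hlt]
      have hmid : PySem.Int.floordiv (lo + hi + 1) 2 = (lo + hi + 1) / 2 :=
        PySem.Int.floordiv_eq_ediv_of_pos (by norm_num)
      set mid := PySem.Int.floordiv (lo + hi + 1) 2 with hmiddef
      have hmid1 : lo < mid := by rw [hmid]; omega
      have hmid2 : mid ≤ hi := by rw [hmid]; omega
      by_cases hle : PySem.Int.floordiv (mid * ((sides - 2) * mid - (sides - 4))) 2 ≤ target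
      · simp only [if_pos hle]
        exact ih mid hi (by omega) hmid2 hle hphi (by omega)
      · simp only [if_neg hle]
        have : target < pvP sides (mid - 1 + 1) := by
          have := lt_of_not_ge hle
          simpa [pvP] using this
        exact ih lo (mid - 1) hlo (by omega) hplo this (by omega)
    · simp only [if_neg hlt]
      have : lo = hi := le_antisymm hlohi (le_of_not_gt hlt)
      subst this
      exact ⟨hlo, hplo, hphi⟩

-- A's loop enumerates exactly the indices 1..k once k brackets the limit
theorem pvLoopA_eq (sides limit k : Int) (hs : 2 ≤ sides)
    (hle : pvP sides k ≤ limit + 1) (hgt : limit + 1 < pvP sides (k + 1)) :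
    ∀ (fuel : Nat) (n : Int) (acc : List Int), 1 ≤ n → n ≤ k + 1 →
      k + 2 - n ≤ (fuel : Int) →
      polygonalsLoopA sides limit n acc fuel =
        acc.reverse ++ (PySem.List.pyRange n (k + 1) 1).map (fun m => pvP sides m) := by
  intro fuel
  induction fuel with
  | zero => intro n acc hn hnk hgap; exfalso; omega
  | succ fuel ih =>
    intro n acc hn hnk hgap
    simp only [polygonalsLoopA]
    by_cases hstop : pvP sides n > limit + 1
    · have hn' : n = k + 1 := by
        by_contra hne
        have hnk' : n ≤ k := by omega
        have := pvP_mono sides n k hs hn hnk'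
        omega
      subst hn'
      simp only [pvP] at hstop
      rw [if_pos hstop]
      have : PySem.List.pyRange (k + 1) (k + 1) 1 = [] := by
        simp
      simp [this]
    · have hcont : ¬ PySem.Int.floordiv (n * ((sides - 2) * n - (sides - 4))) 2 > limit + 1 := by
        simpa [pvP] using hstop
      rw [if_neg hcont]
      have hnk' : n ≤ k := by
        by_contra hne
        have : n = k + 1 := by omega
        subst this
        exact hstop hgt
      rw [ih (n + 1) (_ :: acc) (by omega) (by omega) (by omega)]
      rw [PySem.List.pyRange_one_cons (by omega : n < k + 1)]
      simp [pvP]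

-- ===== VERDICT (by name: the statement is the Claim_ definition above) =====
theorem polygonals_spec : Claim_equal_polygonals := by
  intro sides limit _ hpre
  unfold Spec_polygonals polygonals polygonals_alt
  by_cases htgt : limit + 1 < 1
  · -- first term 1 already exceeds limit + 1: both return []
    have h1 : pvP sides 1 > limit + 1 := by rw [pvP_one]; omega
    simp only [pvP] at h1
    simp only [polygonalsLoopA, if_pos h1, if_pos htgt, List.reverse_nil]
  · have hs : 2 ≤ sides := by rcases hpre with h | h; exact h; omega
    have hlim : 0 ≤ limit := by omega
    simp only [if_neg htgt]
    have hsearch := pvSearch_spec sides (limit + 1) (limit.toNat + 2) 1 (limit + 1)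
      le_rfl (by omega) (by rw [pvP_one]; omega)
      (by have := pvP_ge sides (limit + 1 + 1) hs (by omega); omega)
      (by push_cast; omega)
    obtain ⟨hk1, hkle, hkgt⟩ := hsearch
    set k := polygonalsSearch sides (limit + 1) 1 (limit + 1) (limit.toNat + 2) with hkdef
    have hkub : k ≤ limit + 1 := le_trans (pvP_ge sides k hs hk1) hkle
    have := pvLoopA_eq sides limit k hs hkle hkgt (limit.toNat + 2) 1 []
      le_rfl (by omega) (by push_cast; omega)
    simpa [pvP] using this
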